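-- pv_equiv track=rewrite | github.com/suyoung049/TIL | 2024_취업준비/코테/20240801/왼쪽오르쪽.py | solution
-- ===== SOURCE A (Python) =====
-- def solution(str_list):
--     answer = []
--     for str in str_list:
--         if (str == "l"):
--             answer = str_list[:str_list.index(str)]
--
--         elif (str == "r"):
--             answer = str_list[str_list.index(str):]
--     return answer
-- ===== SOURCE B (Python) =====
-- def solution(str_list):
--     # Scan from the BACK for the marker closest to the end (early exit),
--     # then build the answer from the front with a takewhile/dropwhile-style
--     # pass -- no index() calls, no slicing.
--     for s in reversed(str_list):
--         if s == "l":
--             out = []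
--             for x in str_list:
--                 if x == "l":
--                     break
--                 out.append(x)
--             return out
--         if s == "r":
--             out = []
--             copying = False
--             for x in str_list:
--                 copying = copying or x == "r"
--                 if copying:
--                     out.append(x)
--             return out
--     return []
-- ===== Notes on version B (the rewrite author's own statement) =====
-- stated objective: alternative
-- what changed: backward scan with early exit finds the decisive last marker, then the answer is built element-by-element with a takewhile/dropwhile-style forward pass; A instead reassigns answer at every marker via list.index plus a fresh slice
import Mathlib
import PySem

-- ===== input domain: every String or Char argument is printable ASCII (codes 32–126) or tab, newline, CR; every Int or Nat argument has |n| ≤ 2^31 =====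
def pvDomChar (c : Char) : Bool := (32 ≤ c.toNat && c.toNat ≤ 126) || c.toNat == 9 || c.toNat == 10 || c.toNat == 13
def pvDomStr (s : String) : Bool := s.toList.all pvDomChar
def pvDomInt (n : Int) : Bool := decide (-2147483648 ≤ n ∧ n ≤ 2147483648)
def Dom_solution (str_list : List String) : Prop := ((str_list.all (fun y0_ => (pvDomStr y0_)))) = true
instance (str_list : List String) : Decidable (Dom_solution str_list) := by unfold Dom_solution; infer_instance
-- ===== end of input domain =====

-- B scans the list BACKWARDS with early exit to find the decisive last marker, then
-- builds the answer element-by-element with a takewhile/dropwhile-style forward pass;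
-- A reassigns the answer at every marker via list.index plus a fresh slice (objective: alternative).


-- ===== PORT A =====
-- loop body of A (the 'none' branch of index? is unreachable in the fold: s is in str_list)
def stepA (str_list : List String) (answer : List String) (s : String) : List String :=
  if s = "l" then
    match PySem.List.index? str_list s with
    | some i => PySem.List.slice str_list none (some (i : Int))
    | none => answer
  else if s = "r" then
    match PySem.List.index? str_list s with
    | some i => PySem.List.slice str_list (some (i : Int)) none
    | none => answer
  else answer

def solution (str_list : List String) : List String :=
  str_list.foldl (stepA str_list) []

-- ===== PORT B =====
-- B's backward scan: first element of the reversed list that is "l" or "r"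
def revFind : List String → Option String
  | [] => none
  | s :: rest => if s = "l" then some "l" else if s = "r" then some "r" else revFind rest

-- B's 'l' branch: append until the first "l" (takewhile-style loop with break)
def takeUntilL : List String → List String
  | [] => []
  | x :: t => if x = "l" then [] else x :: takeUntilL t

-- B's 'r' branch: copying flag flips at the first "r" (dropwhile-style loop)
def dropUntilR : Bool → List String → List String
  | _, [] => []
  | copying, x :: t =>
      let c := copying || x == "r"
      if c then x :: dropUntilR c t else dropUntilR c t

def solution_alt (str_list : List String) : List String :=
  match revFind str_list.reverse with
  | some "l" => takeUntilL str_list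
  | some "r" => dropUntilR false str_list
  | _ => []

-- ===== PRECONDITION & SPEC =====
def Spec_solution (str_list : List String) (out : List String) : Prop := out = solution_alt str_list
instance (str_list : List String) (out : List String) : Decidable (Spec_solution str_list out) := by unfold Spec_solution; infer_instance

-- ===== CLAIM (what is proved, stated in full; the proofs are below) =====
def Claim_equal_solution : Prop := ∀ (str_list : List String), Dom_solution str_list → Spec_solution str_list (solution str_list)

-- ===== LEMMAS AND PROOFS =====

-- marker of one element
def marker (s : String) : Option String :=
  if s = "l" then some "l" else if s = "r" then some "r" else none

-- last marker of a list ('l'/'r' closest to the end)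
def lastM : List String → Option String
  | [] => none
  | a :: t => (lastM t).or (marker a)

-- the value A's fold ends with, as a function of the last marker
def resA (str_list : List String) (m : Option String) (acc : List String) : List String :=
  match m with
  | none => acc
  | some c =>
    if c = "l" then
      match PySem.List.index? str_list "l" with
      | some i => PySem.List.slice str_list none (some (i : Int))
      | none => acc
    else
      match PySem.List.index? str_list "r" with
      | some i => PySem.List.slice str_list (some (i : Int)) none
      | none => acc

theorem marker_shape {a m : String} (h : marker a = some m) : a = m ∧ (m = "l" ∨ m = "r") := by
  unfold marker at h
  split_ifs at h with h1 h2 <;> simp_all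

theorem lastM_mem {t : List String} {m : String} (h : lastM t = some m) :
    m ∈ t ∧ (m = "l" ∨ m = "r") := by
  induction t with
  | nil => simp [lastM] at h
  | cons a t ih =>
    unfold lastM at h
    cases hm : lastM t with
    | some v => rw [hm] at h; simp [Option.or] at h; subst h
                exact ⟨List.mem_cons_of_mem _ (ih hm).1, (ih hm).2⟩
    | none => rw [hm] at h; simp [Option.or] at h
              obtain ⟨h1, h2⟩ := marker_shape h
              exact ⟨h1 ▸ List.mem_cons_self, h2⟩

theorem A_fold (xs : List String) :
    ∀ (rest : List String), (∀ a ∈ rest, a ∈ xs) →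
      ∀ acc, rest.foldl (stepA xs) acc = resA xs (lastM rest) acc := by
  intro rest
  induction rest with
  | nil => intro _ acc; rfl
  | cons a t ih =>
    intro h acc
    have hsub : ∀ b ∈ t, b ∈ xs := fun b hb => h b (List.mem_cons_of_mem _ hb)
    rw [List.foldl_cons, ih hsub]
    cases hm : lastM t with
    | none =>
      show resA xs none (stepA xs acc a) = resA xs ((lastM t).or (marker a)) acc
      rw [hm]
      unfold resA stepA marker
      split_ifs <;> simp_all [Option.or]
    | some m =>
      show resA xs (some m) (stepA xs acc a) = resA xs ((lastM t).or (marker a)) acc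
      rw [hm, Option.some_or]
      obtain ⟨hmem, hml⟩ := lastM_mem hm
      have hx : m ∈ xs := hsub m hmem
      rcases hml with h1 | h1 <;> subst h1 <;>
        · obtain ⟨k, hk⟩ := Option.isSome_iff_exists.mp
            ((PySem.List.index?_isSome_iff xs _).mpr hx)
          rw [PySem.List.index?_eq_idxOf?] at hk
          simp [resA, hk]

-- revFind splits over append (first marker wins on the left)
theorem revFind_append (ys zs : List String) :
    revFind (ys ++ zs) = (revFind ys).or (revFind zs) := by
  induction ys with
  | nil => simp [revFind]
  | cons a t ih =>
    by_cases h1 : a = "l"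
    · simp [revFind, h1]
    · by_cases h2 : a = "r" <;> simp [revFind, h1, h2, ih]

-- B's backward scan computes the last marker of the list
theorem revFind_reverse (xs : List String) : revFind xs.reverse = lastM xs := by
  induction xs with
  | nil => rfl
  | cons a t ih =>
    rw [List.reverse_cons, revFind_append, ih, lastM]
    have : revFind [a] = marker a := by
      unfold revFind marker; split_ifs <;> rfl
    rw [this]

-- takewhile loop = take up to the first "l"
theorem takeUntilL_eq (xs : List String) :
    takeUntilL xs = match PySem.List.index? xs "l" with
      | some i => xs.take i
      | none => xs := by
  induction xs with
  | nil => rfl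
  | cons a t ih =>
    by_cases h : a = "l"
    · subst h; rw [PySem.List.index?_cons_self]; simp [takeUntilL]
    · rw [PySem.List.index?_cons_of_ne t h]
      unfold takeUntilL
      rw [if_neg h, ih]
      cases PySem.List.index? t "l" <;> simp

theorem dropUntilR_true (xs : List String) : dropUntilR true xs = xs := by
  induction xs with
  | nil => rfl
  | cons a t ih => simp [dropUntilR, ih]

-- dropwhile loop = drop up to the first "r" (empty when there is none)
theorem dropUntilR_false (xs : List String) :
    dropUntilR false xs = match PySem.List.index? xs "r" with
      | some i => xs.drop i
      | none => [] := by
  induction xs with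
  | nil => rfl
  | cons a t ih =>
    by_cases h : a = "r"
    · subst h; rw [PySem.List.index?_cons_self]
      simp [dropUntilR, dropUntilR_true]
    · rw [PySem.List.index?_cons_of_ne t h]
      have hb : (a == "r") = false := by simp [h]
      unfold dropUntilR
      simp only [hb, Bool.false_or, if_neg (by simp : ¬ (false = true)), ih]
      cases PySem.List.index? t "r" <;> simp

-- ===== VERDICT (by name: the statement is the Claim_ definition above) =====
theorem solution_spec : Claim_equal_solution := by
  intro xs _
  unfold Spec_solution solution solution_alt
  rw [A_fold xs xs (fun a h => h) [], revFind_reverse]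
  cases hm : lastM xs with
  | none => simp [resA]
  | some m =>
    obtain ⟨hmem, hml⟩ := lastM_mem hm
    rcases hml with h1 | h1 <;> subst h1
    · obtain ⟨k, hk⟩ := Option.isSome_iff_exists.mp
        ((PySem.List.index?_isSome_iff xs _).mpr hmem)
      simp only [resA, hk, takeUntilL_eq, reduceIte]
      rw [PySem.List.slice_to_natCast]
    · obtain ⟨k, hk⟩ := Option.isSome_iff_exists.mp
        ((PySem.List.index?_isSome_iff xs _).mpr hmem)
      simp only [resA, hk, dropUntilR_false]
      rw [if_neg (by decide : ¬ ("r" : String) = "l"), PySem.List.slice_from_natCast]
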